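-- pv_equiv track=rewrite | github.com/joeharris76/BenchBox | benchbox/core/data_organization/clustering.py | z_order_key
-- ===== SOURCE A (Python) =====
-- def z_order_key(values: list[int], bits: int = 32) -> int:
--     """Interleave bits from multiple integer dimensions into one Z-order key."""
--     if bits <= 0:
--         raise ValueError(f"bits must be positive, got {bits}")
--
--     key = 0
--     for bit in range(bits):
--         for dim, value in enumerate(values):
--             bit_value = (value >> bit) & 1
--             key |= bit_value << (bit * len(values) + dim)
--     return key
-- ===== SOURCE B (Python) =====
-- def _spread(value, bits, step):
--     """Spread the low `bits` bits of value so bit i lands at position i*step,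
--     by divide-and-conquer on the bit range."""
--     if bits <= 1:
--         return value & 1
--     half = bits // 2
--     return _spread(value, half, step) | (
--         _spread(value >> half, bits - half, step) << (half * step)
--     )
--
--
-- def z_order_key(values: list[int], bits: int = 32) -> int:
--     """Interleave bits from multiple integer dimensions into one Z-order key."""
--     if bits <= 0:
--         raise ValueError(f"bits must be positive, got {bits}")
--
--     key = 0
--     for dim, value in enumerate(values):
--         key |= _spread(value, bits, len(values)) << dim
--     return key
-- ===== Notes on version B (the rewrite author's own statement) =====
-- stated objective: alternative
-- what changed: Replaces A's bit-major double loop (interleaving one bit of every dimension per step) with a dimension-major pass that spreads each value's bits by divide-and-conquer on the bit range and ORs the spread dimensions together.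
import Mathlib
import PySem

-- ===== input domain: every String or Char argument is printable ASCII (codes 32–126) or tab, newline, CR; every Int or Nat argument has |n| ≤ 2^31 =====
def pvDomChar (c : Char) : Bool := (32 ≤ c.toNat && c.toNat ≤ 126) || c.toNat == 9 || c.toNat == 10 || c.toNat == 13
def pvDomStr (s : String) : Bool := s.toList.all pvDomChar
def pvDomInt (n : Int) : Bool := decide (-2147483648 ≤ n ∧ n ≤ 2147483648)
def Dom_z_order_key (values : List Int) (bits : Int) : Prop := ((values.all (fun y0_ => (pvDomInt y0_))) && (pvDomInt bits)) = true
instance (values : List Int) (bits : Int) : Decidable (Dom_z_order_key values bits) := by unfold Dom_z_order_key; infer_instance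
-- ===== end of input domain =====

-- B replaces A's bit-major double loop by a dimension-major pass with a
-- divide-and-conquer bit-spread per dimension (alternative algorithm, same cost).

-- ===== PORT A =====
-- Python's 'x << k' for a nonnegative k, exact (core Int shift by a Nat)
def pvShl (x : Int) (k : Nat) : Int := x <<< k

def z_order_key (values : List Int) (bits : Int) : Int :=
  (PySem.List.pyRange 0 bits 1).foldl (fun key bit =>
      (PySem.List.enumerate values 0).foldl (fun key dv =>
          PySem.Int.bor key
            (pvShl (PySem.Int.band (dv.2 >>> bit.toNat) 1)
              (bit * (values.length : Int) + dv.1).toNat))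
        key)
    0

-- ===== PORT B =====
-- _spread from Source B; the Nat fuel only makes the recursion structural: every call
-- strictly shrinks the positive bit range, so fuel = bits.toNat never runs out
def pvSpreadGo : Nat → Int → Int → Int → Int
  | 0, value, _, _ => PySem.Int.band value 1
  | f + 1, value, bits, step =>
    if bits ≤ 1 then PySem.Int.band value 1
    else
      PySem.Int.bor (pvSpreadGo f value (PySem.Int.floordiv bits 2) step)
        (pvShl (pvSpreadGo f (value >>> (PySem.Int.floordiv bits 2).toNat)
            (bits - PySem.Int.floordiv bits 2) step)
          ((PySem.Int.floordiv bits 2) * step).toNat)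

def pvSpread (value : Int) (bits : Int) (step : Int) : Int :=
  pvSpreadGo bits.toNat value bits step

def z_order_key_alt (values : List Int) (bits : Int) : Int :=
  (PySem.List.enumerate values 0).foldl (fun key dv =>
      PySem.Int.bor key (pvShl (pvSpread dv.2 bits (values.length : Int)) dv.1.toNat))
    0

-- ===== PRECONDITION & SPEC =====
-- A raises ValueError for bits <= 0; on every other input it returns.
def Pre_z_order_key (values : List Int) (bits : Int) : Prop := 0 < bits
instance (values : List Int) (bits : Int) : Decidable (Pre_z_order_key values bits) := by
  unfold Pre_z_order_key; infer_instance
def pvWitness_z_order_key : List Int × Int := ([3, -5, 9], 4)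

def Spec_z_order_key (values : List Int) (bits : Int) (out : Int) : Prop := out = z_order_key_alt values bits
instance (values : List Int) (bits : Int) (out : Int) : Decidable (Spec_z_order_key values bits out) := by unfold Spec_z_order_key; infer_instance

-- ===== CLAIM (what is proved, stated in full; the proofs are below) =====
def Claim_equal_z_order_key : Prop := ∀ (values : List Int) (bits : Int), Dom_z_order_key values bits → Pre_z_order_key values bits → Spec_z_order_key values bits (z_order_key values bits)

-- ===== LEMMAS AND PROOFS =====

-- the single interleaved bit: ((v >> i) & 1), as a natural number
def pvT (v : Int) (i : Nat) : Nat := (PySem.Int.band (v >>> i) 1).toNat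

def pvBigOr : List Nat → Nat
  | [] => 0
  | x :: l => x ||| pvBigOr l

lemma pvBand_one_nonneg (a : Int) : 0 ≤ PySem.Int.band a 1 := by
  rw [PySem.Int.band_comm]
  exact PySem.Int.band_nonneg_of_nonneg_left a (by norm_num)

lemma pvBand_one_cast (a : Int) : PySem.Int.band a 1 = ((PySem.Int.band a 1).toNat : Int) :=
  (Int.toNat_of_nonneg (pvBand_one_nonneg a)).symm

lemma pvNatCast_shiftLeft (m k : Nat) : pvShl (m : Int) k = ((m <<< k : Nat) : Int) := by
  simp [pvShl, Int.shiftLeft_eq, Nat.shiftLeft_eq]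

lemma pvShiftRight_shiftRight (v : Int) (h j : Nat) : (v >>> h) >>> j = v >>> (h + j) := by
  simp only [Int.shiftRight_eq_div_pow]
  rw [Int.ediv_ediv_of_nonneg (show (0 : Int) ≤ ((2 ^ h : Nat) : Int) by positivity)]
  congr 1
  push_cast
  ring

lemma pvShiftLeft_lor (a b : Nat) (k : Nat) : (a ||| b) <<< k = (a <<< k) ||| (b <<< k) := by
  apply Nat.eq_of_testBit_eq
  intro i
  simp only [Nat.testBit_shiftLeft, Nat.testBit_lor]
  by_cases h : i ≥ k <;> simp [h]

lemma pvBigOr_append (l₁ l₂ : List Nat) : pvBigOr (l₁ ++ l₂) = pvBigOr l₁ ||| pvBigOr l₂ := by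
  induction l₁ with
  | nil => simp [pvBigOr]
  | cons x l ih => simp [pvBigOr, ih, Nat.lor_assoc]

lemma pvBigOr_shift (l : List Nat) (k : Nat) :
    pvBigOr (l.map (· <<< k)) = pvBigOr l <<< k := by
  induction l with
  | nil => simp [pvBigOr]
  | cons x l ih => simp [pvBigOr, ih, pvShiftLeft_lor]

lemma pvBigOr_lor_map {α : Type} (g h : α → Nat) (l : List α) :
    pvBigOr (l.map fun x => g x ||| h x) = pvBigOr (l.map g) ||| pvBigOr (l.map h) := by
  induction l with
  | nil => simp [pvBigOr]
  | cons x l ih =>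
    simp only [List.map_cons, pvBigOr, ih]
    rw [Nat.lor_assoc, Nat.lor_assoc]
    congr 1
    rw [← Nat.lor_assoc, ← Nat.lor_assoc, Nat.lor_comm (h x)]

lemma pvBigOr_replicate_zero (k : Nat) : pvBigOr (List.replicate k 0) = 0 := by
  induction k with
  | zero => rfl
  | succ k ih => simpa [pvBigOr, List.replicate_succ] using ih

lemma pvBigOr_swap {α β : Type} (f : α → β → Nat) (l : List α) (m : List β) :
    pvBigOr (l.map fun x => pvBigOr (m.map (f x))) =
      pvBigOr (m.map fun y => pvBigOr (l.map fun x => f x y)) := by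
  induction l with
  | nil => simp [pvBigOr, pvBigOr_replicate_zero]
  | cons x l ih =>
    simp only [List.map_cons, pvBigOr, ih, ← pvBigOr_lor_map]

-- the generic accumulator lemma used for every fold in both ports
lemma pvFoldl_cast {α : Type} (F : α → Nat) (step : Int → α → Int)
    (hstep : ∀ (a : Nat) (x : α), step (a : Int) x = ((a ||| F x : Nat) : Int))
    (l : List α) (a : Nat) :
    l.foldl step (a : Int) = ((a ||| pvBigOr (l.map F) : Nat) : Int) := by
  induction l generalizing a with
  | nil => simp [pvBigOr]
  | cons x l ih =>
    simp only [List.foldl_cons, hstep, ih, List.map_cons, pvBigOr]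
    rw [Nat.lor_assoc]

-- characterisation of the divide-and-conquer spread: the low b bits of v, bit i at position i*n
lemma pvSpreadGo_char (n : Nat) (f : Nat) : ∀ (v : Int) (b : Nat), 1 ≤ b → b ≤ f →
    pvSpreadGo f v (b : Int) (n : Int) =
      ((pvBigOr ((List.range b).map fun i => pvT v i <<< (i * n)) : Nat) : Int) := by
  induction f with
  | zero => intro v b hb hf; omega
  | succ f ih =>
    intro v b hb hf
    by_cases h1 : b = 1
    · subst h1
      rw [pvSpreadGo, if_pos (by norm_num)]
      simp [pvBigOr, pvT, Int.toNat_of_nonneg (pvBand_one_nonneg v)]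
    · have hb2 : 2 ≤ b := by omega
      rw [pvSpreadGo, if_neg (show ¬ ((b : Int) ≤ 1) by omega)]
      have hhalf : PySem.Int.floordiv (b : Int) 2 = ((b / 2 : Nat) : Int) := by
        exact_mod_cast PySem.Int.floordiv_natCast b 2
      set h := b / 2 with hh
      set r := b - h with hr
      have hh1 : 1 ≤ h := by omega
      have hr1 : 1 ≤ r := by omega
      rw [hhalf, show (b : Int) - ((h : Nat) : Int) = ((r : Nat) : Int) by omega,
        Int.toNat_natCast,
        show ((h : Nat) : Int) * (n : Int) = ((h * n : Nat) : Int) by push_cast; ring,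
        Int.toNat_natCast,
        ih v h hh1 (by omega), ih (v >>> h) r hr1 (by omega),
        pvNatCast_shiftLeft, PySem.Int.bor_natCast]
      congr 1
      rw [show b = h + r by omega, List.range_add, List.map_append, pvBigOr_append,
        List.map_map]
      congr 1
      rw [← pvBigOr_shift, List.map_map]
      apply congrArg pvBigOr
      apply List.map_congr_left
      intro j _
      simp only [Function.comp]
      have ht : pvT (v >>> h) j = pvT v (h + j) := by
        simp [pvT, pvShiftRight_shiftRight]
      rw [ht, Nat.add_mul, Nat.add_comm (h * n), ← Nat.shiftLeft_add]

lemma pvSpread_char (v : Int) (n : Nat) (b : Nat) (hb : 1 ≤ b) :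
    pvSpread v (b : Int) (n : Int) =
      ((pvBigOr ((List.range b).map fun i => pvT v i <<< (i * n)) : Nat) : Int) := by
  unfold pvSpread
  rw [Int.toNat_natCast]
  exact pvSpreadGo_char n b v b hb le_rfl

-- ===== VERDICT (by name: the statement is the Claim_ definition above) =====
theorem z_order_key_spec : Claim_equal_z_order_key := by
  intro values bits _hdom hpre
  have hbits : 0 < bits := hpre
  unfold Spec_z_order_key
  have hb' : bits = ((bits.toNat : Nat) : Int) := by omega
  set b := bits.toNat
  have hb1 : 1 ≤ b := by omega
  have hstepIn : ∀ (i : Nat) (a : Nat) (dv : Int × Int),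
      PySem.Int.bor ((a : Nat) : Int)
          (pvShl (PySem.Int.band (dv.2 >>> i) 1)
            (((i : Int)) * (values.length : Int) + dv.1).toNat)
        = (((a ||| (pvT dv.2 i <<< (((i : Int)) * (values.length : Int) + dv.1).toNat)) : Nat) : Int) := by
    intro i a dv
    rw [pvBand_one_cast, pvNatCast_shiftLeft, PySem.Int.bor_natCast]
    rfl
  have hA : z_order_key values bits =
      ((pvBigOr ((List.range b).map fun i =>
          pvBigOr ((PySem.List.enumerate values 0).map fun dv =>
            pvT dv.2 i <<< (((i : Int)) * (values.length : Int) + dv.1).toNat)) : Nat) : Int) := by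
    unfold z_order_key
    rw [hb', PySem.List.pyRange_zero_natCast, List.foldl_map]
    have h0 := pvFoldl_cast
        (fun i : Nat => pvBigOr ((PySem.List.enumerate values 0).map fun dv =>
            pvT dv.2 i <<< (((i : Int)) * (values.length : Int) + dv.1).toNat))
        (fun (key : Int) (i : Nat) =>
          (PySem.List.enumerate values 0).foldl (fun (key : Int) (dv : Int × Int) =>
            PySem.Int.bor key
              (pvShl (PySem.Int.band (dv.2 >>> i) 1)
                (((i : Int)) * (values.length : Int) + dv.1).toNat)) key)
        (fun a i => pvFoldl_cast
          (fun dv : Int × Int => pvT dv.2 i <<< (((i : Int)) * (values.length : Int) + dv.1).toNat)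
          (fun (key : Int) (dv : Int × Int) =>
            PySem.Int.bor key
              (pvShl (PySem.Int.band (dv.2 >>> i) 1)
                (((i : Int)) * (values.length : Int) + dv.1).toNat))
          (hstepIn i) (PySem.List.enumerate values 0) a)
        (List.range b) 0
    exact h0.trans (by simp)
  have hB : z_order_key_alt values bits =
      ((pvBigOr ((PySem.List.enumerate values 0).map fun dv =>
          pvBigOr ((List.range b).map fun i => pvT dv.2 i <<< (i * values.length)) <<< dv.1.toNat) : Nat) : Int) := by
    unfold z_order_key_alt
    have h0 := pvFoldl_cast
        (fun dv : Int × Int =>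
          pvBigOr ((List.range b).map fun i => pvT dv.2 i <<< (i * values.length)) <<< dv.1.toNat)
        (fun (key : Int) (dv : Int × Int) =>
          PySem.Int.bor key (pvShl (pvSpread dv.2 bits (values.length : Int)) dv.1.toNat))
        (fun a dv => by
          beta_reduce
          rw [hb', pvSpread_char dv.2 values.length b hb1, pvNatCast_shiftLeft,
            PySem.Int.bor_natCast])
        (PySem.List.enumerate values 0) 0
    exact h0.trans (by simp)
  rw [hA, hB]
  congr 1
  have hElemB : ∀ dv : Int × Int,
      pvBigOr ((List.range b).map fun i => pvT dv.2 i <<< (i * values.length)) <<< dv.1.toNat =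
        pvBigOr ((List.range b).map fun i => pvT dv.2 i <<< (i * values.length + dv.1.toNat)) := by
    intro dv
    rw [← pvBigOr_shift, List.map_map]
    apply congrArg pvBigOr
    apply List.map_congr_left
    intro i _
    simp only [Function.comp]
    rw [← Nat.shiftLeft_add]
  have hElemA : ∀ (i : Nat) (dv : Int × Int), dv ∈ PySem.List.enumerate values 0 →
      pvT dv.2 i <<< (((i : Int)) * (values.length : Int) + dv.1).toNat =
        pvT dv.2 i <<< (i * values.length + dv.1.toNat) := by
    intro i dv hmem
    obtain ⟨k, hk, hdv⟩ := (PySem.List.mem_enumerate_iff _ _ _).1 hmem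
    have h1 : dv.1 = ((k : Nat) : Int) := by rw [hdv]; simp
    rw [h1, show ((i : Int)) * (values.length : Int) + ((k : Nat) : Int)
          = ((i * values.length + k : Nat) : Int) by push_cast; ring,
      Int.toNat_natCast, Int.toNat_natCast]
  calc pvBigOr ((List.range b).map fun i =>
          pvBigOr ((PySem.List.enumerate values 0).map fun dv =>
            pvT dv.2 i <<< (((i : Int)) * (values.length : Int) + dv.1).toNat))
      = pvBigOr ((List.range b).map fun i =>
          pvBigOr ((PySem.List.enumerate values 0).map fun dv =>
            pvT dv.2 i <<< (i * values.length + dv.1.toNat))) := by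
        apply congrArg pvBigOr
        apply List.map_congr_left
        intro i _
        apply congrArg pvBigOr
        exact List.map_congr_left (hElemA i)
    _ = pvBigOr ((PySem.List.enumerate values 0).map fun dv =>
          pvBigOr ((List.range b).map fun i => pvT dv.2 i <<< (i * values.length + dv.1.toNat))) :=
        pvBigOr_swap (fun i dv => pvT dv.2 i <<< (i * values.length + dv.1.toNat)) (List.range b)
          (PySem.List.enumerate values 0)
    _ = pvBigOr ((PySem.List.enumerate values 0).map fun dv =>
          pvBigOr ((List.range b).map fun i => pvT dv.2 i <<< (i * values.length)) <<< dv.1.toNat) := by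
        apply congrArg pvBigOr
        apply List.map_congr_left
        intro dv _
        exact (hElemB dv).symm
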